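-- pv_equiv track=rewrite | github.com/bsinglet/cipher_tools | vigenere_cracking.py | remove_redundant_patterns
-- ===== SOURCE A (Python) =====
-- import copy
--
-- def remove_redundant_patterns(patterns):
--     """
--     Given a dict whose keys are patterns (strings) and whose values are the
--     locations of their occurrences in a cipher text, remove any redundant
--     patterns. Patterns are redundant if and only if every occurrence of that
--     pattern coincides with the occurrences of a single, larger pattern that
--     incorporates it. For example, if "OW" only occurs inside occurrences of
--     "COW", then we can dismiss "OW" as redundant.
--     :param patterns: The dict to eliminate redundancies from.
--     :type patterns: dict
--     :return: The resulting dict with all redundancies removed.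
--     :rtype: dict
--     """
--     changed = False
--     keys_to_delete = list()
--     non_redundant_patterns = copy.deepcopy(patterns)
--     for suspect_key in non_redundant_patterns.keys():
--         for larger_key in non_redundant_patterns.keys():
--             if len(suspect_key) >= len(larger_key):
--                 continue
--             if suspect_key not in larger_key:
--                 continue
--             if len(non_redundant_patterns[suspect_key]) != len(non_redundant_patterns[larger_key]):
--                 continue
--             difference = larger_key.index(suspect_key)
--             # if suspect_key is NOT at the beginning of larger_key, adjust the
--             # indices accordingly
--             if difference > 0:
--                 adjusted = [x - difference for x in non_redundant_patterns[suspect_key]]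
--             elif difference == 0:
--                 adjusted = non_redundant_patterns[suspect_key]
--             else:
--                 assert 2 + 2 == 5, "Someone changed the code to examine larger_key instances that don't contain suspect_key!"
--             if adjusted == non_redundant_patterns[larger_key]:
--                 # mark the suspect key for deletion
--                 keys_to_delete.append(suspect_key)
--                 changed = True
--                 # we don't need to see if suspect_key perfectly coincides with
--                 # any other larger_keys if it does with one of them.
--                 break
--     if changed:
--         for each_key in keys_to_delete:
--             del non_redundant_patterns[each_key]
--         non_redundant_patterns = remove_redundant_patterns(non_redundant_patterns)
--     return non_redundant_patterns
-- ===== SOURCE B (Python) =====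
-- def remove_redundant_patterns(patterns):
--     """Single pass, no recursion: bucket the patterns by an occurrence
--     signature (count, positions relative to the first occurrence) and look for
--     a covering larger pattern only inside a pattern's own bucket."""
--     buckets = {}
--     for key, locs in patterns.items():
--         first = locs[0] if locs else 0
--         sig = (len(locs), tuple(x - first for x in locs))
--         buckets.setdefault(sig, []).append((key, locs))
--     result = {}
--     for key, locs in patterns.items():
--         first = locs[0] if locs else 0
--         sig = (len(locs), tuple(x - first for x in locs))
--         redundant = False
--         for other, olocs in buckets[sig]:
--             if len(key) < len(other) and key in other:
--                 d = other.index(key)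
--                 ofirst = olocs[0] if olocs else 0
--                 if (not locs) or d == first - ofirst:
--                     redundant = True
--                     break
--         if not redundant:
--             result[key] = locs
--     return result
-- ===== Notes on version B (the rewrite author's own statement) =====
-- stated objective: faster
-- what changed: Replaces A's recursive delete-and-restart fixpoint with a single pass that buckets patterns by an occurrence signature (count, positions relative to the first occurrence) and scans for a covering larger pattern only within the pattern's own bucket; the recursion of A is provably redundant, so one pass suffices.
import Mathlib
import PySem

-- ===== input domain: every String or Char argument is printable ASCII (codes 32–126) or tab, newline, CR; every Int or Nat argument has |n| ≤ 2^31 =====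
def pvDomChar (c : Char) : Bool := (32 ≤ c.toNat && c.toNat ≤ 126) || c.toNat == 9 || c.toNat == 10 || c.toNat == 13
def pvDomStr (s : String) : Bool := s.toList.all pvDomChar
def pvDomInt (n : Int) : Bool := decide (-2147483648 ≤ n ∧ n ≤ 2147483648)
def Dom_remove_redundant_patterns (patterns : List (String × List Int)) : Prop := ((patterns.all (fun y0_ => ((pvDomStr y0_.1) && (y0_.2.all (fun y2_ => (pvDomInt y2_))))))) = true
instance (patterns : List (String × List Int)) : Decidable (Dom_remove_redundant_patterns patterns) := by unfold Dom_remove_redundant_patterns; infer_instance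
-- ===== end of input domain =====

-- B replaces A's recursive delete-and-restart passes by one pass over signature buckets; proved equal on dict inputs (distinct keys).


-- ===== PORT A =====
-- inner loop over larger_key: the body of A's double loop (continue-chain), True = suspect marked via this larger_key
def pvCondA (p : String) (v : List Int) (q : String) (w : List Int) : Bool :=
  if PySem.Str.len q ≤ PySem.Str.len p then false          -- len(suspect) >= len(larger): continue
  else if !(PySem.Str.isIn p q) then false                 -- suspect not in larger: continue
  else if v.length ≠ w.length then false                   -- occurrence counts differ: continue
  else
    let difference := PySem.Str.find q p                   -- larger_key.index(suspect_key); ≥ 0 since isIn holds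
    let adjusted := if 0 < difference then v.map (fun x => x - difference) else v
    adjusted == w

-- suspect_key lands in keys_to_delete iff some larger_key makes the inner loop break
def pvMark (pats : List (String × List Int)) (pv : String × List Int) : Bool :=
  pats.any (fun qw => pvCondA pv.1 pv.2 qw.1 qw.2)

-- keys_to_delete of one pass
def pvKtd (pats : List (String × List Int)) : List String :=
  (pats.filter (fun pv => pvMark pats pv)).map Prod.fst

-- the deletion loop: del non_redundant_patterns[each_key]
def pvDelete (pats : List (String × List Int)) (ktd : List String) : List (String × List Int) :=
  pats.filter (fun pv => !ktd.contains pv.1)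

theorem pvDelete_length_lt (pats : List (String × List Int)) (h : ¬ (pvKtd pats).isEmpty = true) :
    (pvDelete pats (pvKtd pats)).length < pats.length := by
  rw [Bool.not_eq_true, List.isEmpty_eq_false_iff_exists_mem] at h
  obtain ⟨k, hk⟩ := h
  rw [pvKtd, List.mem_map] at hk
  obtain ⟨pv, hpv, hfst⟩ := hk
  rw [List.mem_filter] at hpv
  refine List.length_filter_lt_length_iff_exists.2 ⟨pv, hpv.1, ?_⟩
  simp only [Bool.not_eq_true', Bool.not_eq_false, List.contains_eq_mem, decide_eq_true_eq, pvKtd]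
  exact List.mem_map.2 ⟨pv, List.mem_filter.2 hpv, rfl⟩

def remove_redundant_patterns (patterns : List (String × List Int)) : List (String × List Int) :=
  let keys_to_delete := pvKtd patterns
  if keys_to_delete.isEmpty then patterns                  -- changed = False
  else remove_redundant_patterns (pvDelete patterns keys_to_delete)
termination_by patterns.length
decreasing_by rename_i h; exact pvDelete_length_lt patterns h

-- ===== PORT B =====
def pvFirst (v : List Int) : Int := match v with | [] => 0 | x :: _ => x

-- the bucket signature: (len(locs), tuple(x - first for x in locs))
def pvSig (v : List Int) : Int × List Int := ((v.length : Int), v.map (fun x => x - pvFirst v))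

-- body of B's inner loop over the bucket
def pvCondB (p : String) (v : List Int) (q : String) (w : List Int) : Bool :=
  if PySem.Str.len p < PySem.Str.len q && PySem.Str.isIn p q then
    let d := PySem.Str.find q p
    v.isEmpty || (d == pvFirst v - pvFirst w)
  else false

def remove_redundant_patterns_alt (patterns : List (String × List Int)) : List (String × List Int) :=
  let buckets : PySem.Dict (Int × List Int) (List (String × List Int)) :=
    patterns.foldl (fun b pv => b.modify (pvSig pv.2) [] (fun l => l ++ [pv])) PySem.Dict.empty
  patterns.foldl (fun res pv =>
    if (buckets.getD (pvSig pv.2) []).any (fun qw => pvCondB pv.1 pv.2 qw.1 qw.2) then res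
    else res ++ [pv]) []

-- ===== PRECONDITION & SPEC =====
-- Pre_ requires pairwise-distinct keys: A's argument is a Python dict, whose keys are necessarily
-- distinct, so duplicate-key association lists correspond to no Python input at all.
def Pre_remove_redundant_patterns (patterns : List (String × List Int)) : Prop :=
  (patterns.map Prod.fst).Nodup
instance (patterns : List (String × List Int)) : Decidable (Pre_remove_redundant_patterns patterns) := by unfold Pre_remove_redundant_patterns; infer_instance
def pvWitness_remove_redundant_patterns : (List (String × List Int)) := [("ab", [0]), ("b", [1])]
def Spec_remove_redundant_patterns (patterns : List (String × List Int)) (out : List (String × List Int)) : Prop := out = remove_redundant_patterns_alt patterns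
instance (patterns : List (String × List Int)) (out : List (String × List Int)) : Decidable (Spec_remove_redundant_patterns patterns out) := by unfold Spec_remove_redundant_patterns; infer_instance

-- ===== CLAIM (what is proved, stated in full; the proofs are below) =====
def Claim_equal_remove_redundant_patterns : Prop := ∀ (patterns : List (String × List Int)), Dom_remove_redundant_patterns patterns → Pre_remove_redundant_patterns patterns → Spec_remove_redundant_patterns patterns (remove_redundant_patterns patterns)

-- ===== LEMMAS AND PROOFS =====

-- shifting a nonempty list onto another = the shift is the head difference and the relative shapes agree
theorem pv_map_sub_iff (d a b : Int) (v' w' : List Int) :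
    ((a :: v').map (fun x => x - d) = b :: w') ↔
      ((b :: w').map (fun x => x - b) = (a :: v').map (fun x => x - a) ∧ d = a - b) := by
  simp only [List.map_cons, List.cons_eq_cons]
  constructor
  · rintro ⟨h1, h2⟩
    refine ⟨⟨by omega, ?_⟩, by omega⟩
    rw [← h2, List.map_map]
    exact List.map_congr_left (fun x _ => by simp only [Function.comp_apply]; omega)
  · rintro ⟨⟨_, h2⟩, h3⟩
    refine ⟨by omega, ?_⟩
    have e : v'.map (fun x => x - d) = (v'.map (fun x => x - a)).map (fun y => y + (a - d)) := by
      rw [List.map_map]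
      exact (List.map_congr_left (fun x _ => by simp only [Function.comp_apply]; omega)).symm
    rw [e, ← h2, List.map_map,
      show ((fun y : Int => y + (a - d)) ∘ fun x : Int => x - b) = id from
        funext fun x => by simp only [Function.comp_apply, id_eq]; omega,
      List.map_id]

-- A's inner-loop condition factors through the signature and B's inner-loop condition
theorem pv_cond_eq (p : String) (v : List Int) (q : String) (w : List Int) :
    pvCondA p v q w = ((pvSig w == pvSig v) && pvCondB p v q w) := by
  by_cases hq : q.length ≤ p.length
  · simp [pvCondA, pvCondB, PySem.Str.len, hq, not_lt.2 hq]
  · by_cases hin : PySem.Chars.isIn p.toList q.toList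
    · have hd : 0 ≤ PySem.Chars.find q.toList p.toList :=
        (PySem.Chars.find_nonneg_iff _ _).2 ((PySem.Chars.isIn_iff_infix _ _).1 hin)
      have hadj : (if 0 < PySem.Chars.find q.toList p.toList then
            List.map (fun x => x - PySem.Chars.find q.toList p.toList) v else v)
          = List.map (fun x => x - PySem.Chars.find q.toList p.toList) v := by
        by_cases h0 : 0 < PySem.Chars.find q.toList p.toList
        · simp [h0]
        · have h1 : PySem.Chars.find q.toList p.toList = 0 := by omega
          simp [h1]
      have hA : pvCondA p v q w
          = (decide (v.length = w.length) && (v.map (fun x => x - PySem.Chars.find q.toList p.toList) == w)) := by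
        simp [pvCondA, PySem.Str.len, hq, hin, hadj]
      have hB : pvCondB p v q w
          = (v.isEmpty || (PySem.Chars.find q.toList p.toList == pvFirst v - pvFirst w)) := by
        simp [pvCondB, PySem.Str.len, lt_of_not_ge hq, hin]
      rw [hA, hB]
      generalize PySem.Chars.find q.toList p.toList = d at hd
      cases v with
      | nil =>
        cases w with
        | nil => simp [pvSig]
        | cons b w' => simp [pvSig]
      | cons a v' =>
        cases w with
        | nil => simp [pvSig]
        | cons b w' =>
          rw [Bool.eq_iff_iff]
          simp only [Bool.and_eq_true, Bool.or_eq_true, decide_eq_true_eq, beq_iff_eq,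
            List.isEmpty_cons, Bool.false_eq_true, false_or, pvSig, pvFirst, Prod.mk.injEq,
            Nat.cast_inj]
          constructor
          · rintro ⟨hl, hm⟩
            obtain ⟨hsig, hdab⟩ := (pv_map_sub_iff d a b v' w').1 hm
            exact ⟨⟨hl.symm, hsig⟩, hdab⟩
          · rintro ⟨⟨hl, hm⟩, hdab⟩
            exact ⟨hl.symm, (pv_map_sub_iff d a b v' w').2 ⟨hm, hdab⟩⟩
    · simp [pvCondA, pvCondB, PySem.Str.len, hq, hin]

-- the bucket for signature s holds exactly the patterns with that signature, in input order
theorem pv_bucket_getD (pats : List (String × List Int)) (s : Int × List Int) :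
    (pats.foldl (fun b pv => b.modify (pvSig pv.2) [] (fun l => l ++ [pv])) PySem.Dict.empty).getD s []
      = pats.filter (fun qw => pvSig qw.2 == s) := by
  have h1 : pats.foldl (fun b pv => b.modify (pvSig pv.2) [] (fun l => l ++ [pv])) PySem.Dict.empty
      = (pats.map (fun pv => (pvSig pv.2, pv))).foldl
          (fun d p => d.modify p.1 [] (fun x => x ++ [p.2])) PySem.Dict.empty := by
    rw [List.foldl_map]
  rw [h1, PySem.Dict.getD_foldl_modify_append, List.filter_map, List.map_map]
  simp only [PySem.Dict.getD_empty, List.nil_append]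
  have h2 : ((fun p : (Int × List Int) × (String × List Int) => p.1 == s)
        ∘ fun pv : String × List Int => (pvSig pv.2, pv))
      = fun qw : String × List Int => pvSig qw.2 == s := rfl
  have h3 : ((fun x : (Int × List Int) × (String × List Int) => x.2)
        ∘ fun pv : String × List Int => (pvSig pv.2, pv)) = id := rfl
  rw [h2, h3, List.map_id]

-- A's marking = a scan of the suspect's own bucket with B's condition
theorem pv_mark_eq_bucket (pats : List (String × List Int)) (pv : String × List Int) :
    pvMark pats pv
      = (pats.filter (fun qw => pvSig qw.2 == pvSig pv.2)).any (fun qw => pvCondB pv.1 pv.2 qw.1 qw.2) := by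
  rw [List.any_filter]
  unfold pvMark
  congr 1
  funext qw
  exact pv_cond_eq pv.1 pv.2 qw.1 qw.2

-- B is the one-pass filter by non-markedness
theorem pv_alt_eq_filter (pats : List (String × List Int)) :
    remove_redundant_patterns_alt pats = pats.filter (fun pv => !pvMark pats pv) := by
  unfold remove_redundant_patterns_alt
  dsimp only
  have hfun : (fun (res : List (String × List Int)) pv =>
        if ((pats.foldl (fun b pv => b.modify (pvSig pv.2) [] (fun l => l ++ [pv])) PySem.Dict.empty).getD (pvSig pv.2) []).any
            (fun qw => pvCondB pv.1 pv.2 qw.1 qw.2) then res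
        else res ++ [pv])
      = (fun res pv => if (!pvMark pats pv) = true then res ++ [pv] else res) := by
    funext res pv
    rw [pv_bucket_getD, ← pv_mark_eq_bucket]
    cases h : pvMark pats pv <;> simp
  rw [hfun]
  simpa using PySem.List.foldl_append_if (fun pv => !pvMark pats pv) id pats []

-- A's recursion is vacuous: one pass already reaches the fixpoint (keys are distinct)
theorem pv_A_eq_filter (pats : List (String × List Int)) (h : (pats.map Prod.fst).Nodup) :
    remove_redundant_patterns pats = pats.filter (fun pv => !pvMark pats pv) := by
  rw [remove_redundant_patterns]
  by_cases hk : (pvKtd pats).isEmpty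
  · rw [if_pos hk]
    have hall : ∀ pv ∈ pats, pvMark pats pv = false := by
      intro pv hpv
      by_contra hmk
      have : pv.1 ∈ pvKtd pats := by
        unfold pvKtd
        exact List.mem_map.2 ⟨pv, List.mem_filter.2 ⟨hpv, Bool.not_eq_false _ ▸ (by simpa using hmk)⟩, rfl⟩
      rw [List.isEmpty_iff] at hk
      simp [hk] at this
    exact (List.filter_eq_self.2 (fun pv hpv => by simp [hall pv hpv])).symm
  · rw [if_neg hk]
    have hS : pvDelete pats (pvKtd pats) = pats.filter (fun pv => !pvMark pats pv) := by
      unfold pvDelete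
      apply List.filter_congr
      intro pv hpv
      suffices hsf : (pvKtd pats).contains pv.1 = pvMark pats pv by rw [hsf]
      cases hm : pvMark pats pv with
      | true =>
        simp only [List.contains_eq_mem, decide_eq_true_eq, pvKtd]
        exact List.mem_map.2 ⟨pv, List.mem_filter.2 ⟨hpv, hm⟩, rfl⟩
      | false =>
        simp only [List.contains_eq_mem, decide_eq_false_iff_not, pvKtd, List.mem_map]
        rintro ⟨qw, hqw, hfst⟩
        rw [List.mem_filter] at hqw
        have heq : qw = pv := List.inj_on_of_nodup_map h hqw.1 hpv hfst
        rw [heq] at hqw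
        rw [hqw.2] at hm
        exact Bool.true_eq_false ▸ hm
    rw [hS]
    have hmarkS : ∀ pv ∈ pats.filter (fun pv => !pvMark pats pv),
        pvMark (pats.filter (fun pv => !pvMark pats pv)) pv = false := by
      intro pv hpv
      have hpv' := List.mem_filter.1 hpv
      cases hm : pvMark (pats.filter (fun pv => !pvMark pats pv)) pv with
      | false => rfl
      | true =>
        unfold pvMark at hm
        rw [List.any_eq_true] at hm
        obtain ⟨qw, hqw, hcond⟩ := hm
        have : pvMark pats pv = true := by
          unfold pvMark
          rw [List.any_eq_true]
          exact ⟨qw, (List.mem_filter.1 hqw).1, hcond⟩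
        rw [this] at hpv'
        simpa using hpv'.2
    have hktd : pvKtd (pats.filter (fun pv => !pvMark pats pv)) = [] := by
      unfold pvKtd
      rw [List.filter_eq_nil_iff.2 (fun pv hpv => by simp [hmarkS pv hpv]), List.map_nil]
    rw [remove_redundant_patterns, hktd]
    simp

-- ===== VERDICT (by name: the statement is the Claim_ definition above) =====
theorem remove_redundant_patterns_spec : Claim_equal_remove_redundant_patterns := by
  intro pats _ hpre
  unfold Spec_remove_redundant_patterns
  rw [pv_A_eq_filter pats hpre, ← pv_alt_eq_filter]
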